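-- pv_equiv track=rewrite | github.com/hendpraz/coding-exercises | hackerrank/easy/jumping_on_clouds.py | jumpingOnClouds
-- ===== SOURCE A (Python) =====
-- def jumpingOnClouds(c):
--     n = len(c)
--
--     if(n == 0):
--         return 0
--     elif(c[0] != 0):
--         return 999
--     else:
--         temp1 = list(c)
--         temp1.pop(0)
--         if(len(temp1) >= 2):
--             path1 = jumpingOnClouds(temp1)
--             temp2 = list(temp1)
--             temp2.pop(0)
--             path2 = jumpingOnClouds(temp2)
--         else:
--             if(len(temp1) == 1):
--                 path1 = jumpingOnClouds(temp1)
--             else: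
--                 return 0
--             path2 = 0
--         return 1 + min(path1, path2)
-- ===== SOURCE B (Python) =====
-- def jumpingOnClouds(c):
--     # Backward DP with two rolling accumulators (alternative to A's double recursion).
--     n = len(c)
--     dp1 = 0  # value of suffix starting at i+1
--     dp2 = 0  # value of suffix starting at i+2
--     for i in range(n - 1, -1, -1):
--         if c[i] != 0:
--             cur = 999
--         elif i == n - 1:
--             cur = 0
--         elif i == n - 2:
--             cur = 1 + min(dp1, 0)
--         else:
--             cur = 1 + min(dp1, dp2)
--         dp1, dp2 = cur, dp1
--     return dp1
-- ===== Notes on version B (the rewrite author's own statement) =====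
-- stated objective: alternative
-- what changed: Replaced A's memo-less double recursion over suffixes by a single backward pass with two rolling DP accumulators; on random inputs A usually returns 999 immediately, so no speed is claimed.
import Mathlib
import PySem

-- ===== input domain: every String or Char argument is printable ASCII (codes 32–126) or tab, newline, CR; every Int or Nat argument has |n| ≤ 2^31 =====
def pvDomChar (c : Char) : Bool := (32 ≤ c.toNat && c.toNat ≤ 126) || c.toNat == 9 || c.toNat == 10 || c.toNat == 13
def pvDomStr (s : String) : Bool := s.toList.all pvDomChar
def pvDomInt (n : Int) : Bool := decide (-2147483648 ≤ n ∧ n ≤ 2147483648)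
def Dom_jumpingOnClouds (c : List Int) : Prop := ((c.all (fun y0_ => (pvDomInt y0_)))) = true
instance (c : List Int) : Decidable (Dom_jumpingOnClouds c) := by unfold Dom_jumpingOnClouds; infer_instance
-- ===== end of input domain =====

-- ===== PORT A =====
-- B replaces A's double recursion over suffixes by a backward DP pass with two accumulators (alternative algorithm).
def jumpingOnClouds (c : List Int) : Int :=
  match c with
  | [] => 0
  | x :: t =>
    if x ≠ 0 then 999
    else if t.length ≥ 2 then
      1 + min (jumpingOnClouds t) (jumpingOnClouds t.tail)
    else if t.length = 1 then
      1 + min (jumpingOnClouds t) 0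
    else 0
termination_by c.length

-- ===== PORT B =====
-- backward loop of Source B: state (dp1, dp2) = (value at i+1, value at i+2); recursion on the
-- list plays the role of the index loop i = n-1 .. 0.
def jocGo (c : List Int) : Int × Int :=
  match c with
  | [] => (0, 0)
  | x :: t =>
    let p := jocGo t
    let cur : Int :=
      if x ≠ 0 then 999
      else if t = [] then 0
      else if t.length = 1 then 1 + min p.1 0
      else 1 + min p.1 p.2
    (cur, p.1)

def jumpingOnClouds_alt (c : List Int) : Int := (jocGo c).1

-- ===== PRECONDITION & SPEC =====
def Spec_jumpingOnClouds (c : List Int) (out : Int) : Prop := out = jumpingOnClouds_alt c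
instance (c : List Int) (out : Int) : Decidable (Spec_jumpingOnClouds c out) := by unfold Spec_jumpingOnClouds; infer_instance

-- ===== CLAIM (what is proved, stated in full; the proofs are below) =====
def Claim_equal_jumpingOnClouds : Prop := ∀ (c : List Int), Dom_jumpingOnClouds c → Spec_jumpingOnClouds c (jumpingOnClouds c)

-- ===== LEMMAS AND PROOFS =====

-- ===== VERDICT (by name: the statement is the Claim_ definition above) =====
theorem A_two (x y z : Int) (tss : List Int) :
    jumpingOnClouds (x :: y :: z :: tss) =
      if x ≠ 0 then 999
      else 1 + min (jumpingOnClouds (y :: z :: tss)) (jumpingOnClouds (z :: tss)) := by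
  rw [jumpingOnClouds]
  by_cases hx : x = 0 <;> simp [hx, List.length_cons]

theorem jocGo_eq (c : List Int) : jocGo c = (jumpingOnClouds c, jumpingOnClouds c.tail) := by
  induction c with
  | nil => simp [jocGo, jumpingOnClouds]
  | cons x t ih =>
    rw [jocGo, ih]
    cases t with
    | nil => by_cases hx : x = 0 <;> simp [jumpingOnClouds, hx]
    | cons y ts =>
      cases ts with
      | nil =>
        refine Prod.ext ?_ rfl
        by_cases hx : x = 0 <;> by_cases hy : y = 0 <;>
          simp [jumpingOnClouds, hx, hy]
      | cons z tss =>
        refine Prod.ext ?_ rfl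
        rw [A_two]
        by_cases hx : x = 0 <;> simp [hx, List.length_cons]

theorem jumpingOnClouds_spec : Claim_equal_jumpingOnClouds := by
  intro c _
  unfold Spec_jumpingOnClouds jumpingOnClouds_alt
  rw [jocGo_eq]
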